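-- pv_equiv track=rewrite | github.com/chillbot-io/openlabels | openrisk/openlabels/adapters/scanner/constants.py | is_name_entity_type
-- ===== SOURCE A (Python) =====
-- NAME_ENTITY_TYPES = frozenset({
--     "NAME", "NAME_PATIENT", "NAME_PROVIDER", "NAME_RELATIVE",
--     "PERSON", "PER",
-- })
--
-- def is_name_entity_type(entity_type: str) -> bool:
--     """Check if entity type represents a person name."""
--     if entity_type in NAME_ENTITY_TYPES:
--         return True
--     for suffix in ("_PATIENT", "_PROVIDER", "_RELATIVE"):
--         if entity_type.endswith(suffix):
--             base = entity_type[:-len(suffix)]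
--             return base in NAME_ENTITY_TYPES
--     return False
-- ===== SOURCE B (Python) =====
-- NAME_ENTITY_TYPES = frozenset({
--     "NAME", "NAME_PATIENT", "NAME_PROVIDER", "NAME_RELATIVE",
--     "PERSON", "PER",
-- })
--
-- _NAME_SUFFIXES = frozenset({"_PATIENT", "_PROVIDER", "_RELATIVE"})
--
-- def is_name_entity_type(entity_type: str) -> bool:
--     """Check if entity type represents a person name."""
--     if entity_type in NAME_ENTITY_TYPES:
--         return True
--     base, sep, tail = entity_type.rpartition('_')
--     return bool(sep) and ('_' + tail) in _NAME_SUFFIXES and base in NAME_ENTITY_TYPES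
-- ===== Notes on version B (the rewrite author's own statement) =====
-- stated objective: alternative
-- what changed: Replaces the three sequential endswith+slice checks by a single rpartition at the last underscore, then one membership test of the underscore-plus-tail string in a suffix set and of the base in NAME_ENTITY_TYPES.
import Mathlib
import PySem

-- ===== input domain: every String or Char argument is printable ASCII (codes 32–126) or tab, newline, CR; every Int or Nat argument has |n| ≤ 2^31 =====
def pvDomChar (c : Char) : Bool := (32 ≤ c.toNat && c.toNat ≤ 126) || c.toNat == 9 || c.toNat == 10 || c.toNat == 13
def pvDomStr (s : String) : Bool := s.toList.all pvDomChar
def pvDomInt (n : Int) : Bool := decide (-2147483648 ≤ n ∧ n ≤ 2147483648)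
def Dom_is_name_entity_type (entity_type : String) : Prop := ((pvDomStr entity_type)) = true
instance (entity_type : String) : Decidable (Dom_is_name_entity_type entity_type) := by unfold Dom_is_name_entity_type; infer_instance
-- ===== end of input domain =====

-- B replaces A's three sequential endswith+slice attempts by one rpartition at the last
-- underscore followed by set-membership tests (alternative decomposition, same cost).

-- ===== PORT A =====
def NAME_ENTITY_TYPES : PySem.Set String :=
  PySem.Set.ofList ["NAME", "NAME_PATIENT", "NAME_PROVIDER", "NAME_RELATIVE", "PERSON", "PER"]

-- the 'for suffix in (...)' loop of A with its early return
def suffixLoop (entity_type : String) : List String → Bool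
  | [] => false
  | suffix :: rest =>
    if PySem.Str.endswith entity_type suffix then
      PySem.Set.contains NAME_ENTITY_TYPES
        (PySem.Str.slice entity_type none (some (-(PySem.Str.len suffix : Int))))
    else suffixLoop entity_type rest

def is_name_entity_type (entity_type : String) : Bool :=
  if PySem.Set.contains NAME_ENTITY_TYPES entity_type then true
  else suffixLoop entity_type ["_PATIENT", "_PROVIDER", "_RELATIVE"]

-- ===== PORT B =====
def NAME_SUFFIXES : PySem.Set String := PySem.Set.ofList ["_PATIENT", "_PROVIDER", "_RELATIVE"]

-- hand port of str.rpartition('_') restricted to what B uses: scanning the REVERSED character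
-- list, returns some (chars before the last '_', chars after it), or none if no '_' (exact)
def rpartU (acc : List Char) : List Char → Option (List Char × List Char)
  | [] => none
  | c :: rest => if c = '_' then some (rest.reverse, acc) else rpartU (c :: acc) rest

def is_name_entity_type_alt (entity_type : String) : Bool :=
  if PySem.Set.contains NAME_ENTITY_TYPES entity_type then true
  else
    match rpartU [] entity_type.toList.reverse with
    | none => false  -- sep = '' : bool(sep) is False
    | some (base, tail) =>
      PySem.Set.contains NAME_SUFFIXES (String.ofList ('_' :: tail)) &&
      PySem.Set.contains NAME_ENTITY_TYPES (String.ofList base)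

-- ===== PRECONDITION & SPEC =====
def Spec_is_name_entity_type (entity_type : String) (out : Bool) : Prop := out = is_name_entity_type_alt entity_type
instance (entity_type : String) (out : Bool) : Decidable (Spec_is_name_entity_type entity_type out) := by unfold Spec_is_name_entity_type; infer_instance

-- ===== CLAIM (what is proved, stated in full; the proofs are below) =====
def Claim_equal_is_name_entity_type : Prop := ∀ (entity_type : String), Dom_is_name_entity_type entity_type → Spec_is_name_entity_type entity_type (is_name_entity_type entity_type)

-- ===== LEMMAS AND PROOFS =====

-- rpartU splits at the LAST '_': scanning u ++ '_' :: v with no '_' in u finds that '_'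
theorem rpartU_found (u : List Char) (hu : '_' ∉ u) (v acc : List Char) :
    rpartU acc (u ++ '_' :: v) = some (v.reverse, u.reverse ++ acc) := by
  induction u generalizing acc with
  | nil => simp [rpartU]
  | cons c cs ih =>
    simp only [List.mem_cons, not_or] at hu
    simp [rpartU, Ne.symm hu.1, ih hu.2 (c :: acc)]

theorem rpartU_some (r : List Char) : ∀ acc b t, rpartU acc r = some (b, t) →
    ∃ u, '_' ∉ u ∧ r = u ++ '_' :: b.reverse ∧ t = u.reverse ++ acc := by
  induction r with
  | nil => intro acc b t h; simp [rpartU] at h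
  | cons c cs ih =>
    intro acc b t h
    by_cases hc : c = '_'
    · subst hc
      simp [rpartU] at h
      refine ⟨[], by simp, ?_, ?_⟩
      · simp [← h.1]
      · simp [h.2]
    · simp only [rpartU, if_neg hc] at h
      obtain ⟨u, hu, hr, ht⟩ := ih (c :: acc) b t h
      refine ⟨c :: u, ?_, by simp [hr], by simp [ht]⟩
      simp [hu]
      exact fun h => hc h.symm

-- if e ends with '_' :: t where t contains no '_', rpartU finds exactly that split
theorem ends_case (e : String) (b t : List Char) (ht : '_' ∉ t)
    (hb : b ++ '_' :: t = e.toList) :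
    rpartU [] e.toList.reverse = some (b, t) := by
  have hrev : e.toList.reverse = t.reverse ++ '_' :: b.reverse := by
    rw [← hb]; simp
  rw [hrev, rpartU_found t.reverse (by simpa using ht) b.reverse []]
  simp

-- e[:-len(t)] is the base when e ends with t
theorem slice_base (e : String) (b t : List Char) (hb : b ++ t = e.toList) (ht : 0 < t.length) :
    PySem.Str.slice e none (some (-(t.length : Int))) = String.ofList b := by
  have hs : PySem.List.slice e.toList none (some (-(t.length : Int)))
      = e.toList.take (e.toList.length - t.length) :=
    PySem.List.slice_to_neg_natCast e.toList t.length ht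
  have h2 : (PySem.Str.slice e none (some (-(t.length : Int)))).toList
      = e.toList.take (e.toList.length - t.length) := by simp [hs]
  have h1 : (PySem.Str.slice e none (some (-(t.length : Int)))).toList = b := by
    rw [h2, ← hb]; simp
  have := congrArg String.ofList h1
  simpa using this

-- the matching-suffix branch: rpartU finds (base, tail) and B's two tests reduce to A's base test
theorem branch_true (e suf : String) (b tl : List Char)
    (hsplit : suf.toList = '_' :: tl) (htl : '_' ∉ tl)
    (hb : b ++ suf.toList = e.toList)
    (hmem : suf ∈ NAME_SUFFIXES) :
    (match rpartU [] e.toList.reverse with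
     | none => false
     | some (base, tail) =>
       PySem.Set.contains NAME_SUFFIXES (String.ofList ('_' :: tail)) &&
       PySem.Set.contains NAME_ENTITY_TYPES (String.ofList base))
    = PySem.Set.contains NAME_ENTITY_TYPES (String.ofList b) := by
  have hb' : b ++ '_' :: tl = e.toList := by rw [← hsplit]; exact hb
  rw [ends_case e b tl htl hb']
  have hsu : String.ofList ('_' :: tl) = suf := by rw [← hsplit]; simp
  simp [hsu, PySem.Set.contains, hmem]

theorem spec_main (e : String) : is_name_entity_type e = is_name_entity_type_alt e := by
  unfold is_name_entity_type is_name_entity_type_alt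
  by_cases hfast : PySem.Set.contains NAME_ENTITY_TYPES e = true
  · rw [if_pos hfast, if_pos hfast]
  · rw [if_neg hfast, if_neg hfast]
    by_cases h1 : ("_PATIENT" : String).toList <:+ e.toList
    · obtain ⟨b, hb⟩ := h1
      have hA : PySem.Str.endswith e "_PATIENT" = true := by
        simp [PySem.Chars.endswith_iff]; exact ⟨b, hb⟩
      simp only [suffixLoop, if_pos hA]
      rw [branch_true e "_PATIENT" b (("PATIENT" : String).toList) (by decide) (by decide) hb
        (by decide)]
      rw [show (PySem.Str.len "_PATIENT" : Int) = ((("_PATIENT" : String).toList.length : Nat) : Int)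
        from by decide]
      rw [slice_base e b (("_PATIENT" : String).toList) hb (by decide)]
    · have hA1 : ¬ PySem.Str.endswith e "_PATIENT" = true := by
        simp [PySem.Chars.endswith_iff]; exact h1
      by_cases h2 : ("_PROVIDER" : String).toList <:+ e.toList
      · obtain ⟨b, hb⟩ := h2
        have hA : PySem.Str.endswith e "_PROVIDER" = true := by
          simp [PySem.Chars.endswith_iff]; exact ⟨b, hb⟩
        simp only [suffixLoop, if_neg hA1, if_pos hA]
        rw [branch_true e "_PROVIDER" b (("PROVIDER" : String).toList) (by decide) (by decide) hb
          (by decide)]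
        rw [show (PySem.Str.len "_PROVIDER" : Int) = ((("_PROVIDER" : String).toList.length : Nat) : Int)
          from by decide]
        rw [slice_base e b (("_PROVIDER" : String).toList) hb (by decide)]
      · have hA2 : ¬ PySem.Str.endswith e "_PROVIDER" = true := by
          simp [PySem.Chars.endswith_iff]; exact h2
        by_cases h3 : ("_RELATIVE" : String).toList <:+ e.toList
        · obtain ⟨b, hb⟩ := h3
          have hA : PySem.Str.endswith e "_RELATIVE" = true := by
            simp [PySem.Chars.endswith_iff]; exact ⟨b, hb⟩
          simp only [suffixLoop, if_neg hA1, if_neg hA2, if_pos hA]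
          rw [branch_true e "_RELATIVE" b (("RELATIVE" : String).toList) (by decide) (by decide) hb
            (by decide)]
          rw [show (PySem.Str.len "_RELATIVE" : Int) = ((("_RELATIVE" : String).toList.length : Nat) : Int)
            from by decide]
          rw [slice_base e b (("_RELATIVE" : String).toList) hb (by decide)]
        · have hA3 : ¬ PySem.Str.endswith e "_RELATIVE" = true := by
            simp [PySem.Chars.endswith_iff]; exact h3
          simp only [suffixLoop, if_neg hA1, if_neg hA2, if_neg hA3]
          rcases hr : rpartU [] e.toList.reverse with _ | ⟨b, t⟩
          · rfl
          · obtain ⟨u, hu, hrv, htv⟩ := rpartU_some _ [] b t hr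
            simp only [List.append_nil] at htv
            subst htv
            have he : b ++ '_' :: u.reverse = e.toList := by
              have := congrArg List.reverse hrv
              simp at this
              rw [← this]
            have hmem : ¬ String.ofList ('_' :: u.reverse) ∈ NAME_SUFFIXES := by
              intro hm
              have hm3 : String.ofList ('_' :: u.reverse) = "_PATIENT" ∨
                  String.ofList ('_' :: u.reverse) = "_PROVIDER" ∨
                  String.ofList ('_' :: u.reverse) = "_RELATIVE" := by
                rw [show NAME_SUFFIXES = ["_PATIENT", "_PROVIDER", "_RELATIVE"] from by decide] at hm
                simpa using hm
              rcases hm3 with h | h | h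
              · exact h1 ⟨b, by rw [show ("_PATIENT" : String).toList = '_' :: u.reverse from
                  by simpa using (congrArg String.toList h).symm]; exact he⟩
              · exact h2 ⟨b, by rw [show ("_PROVIDER" : String).toList = '_' :: u.reverse from
                  by simpa using (congrArg String.toList h).symm]; exact he⟩
              · exact h3 ⟨b, by rw [show ("_RELATIVE" : String).toList = '_' :: u.reverse from
                  by simpa using (congrArg String.toList h).symm]; exact he⟩
            simp
            exact fun hm => absurd hm hmem

-- ===== VERDICT (by name: the statement is the Claim_ definition above) =====
theorem is_name_entity_type_spec : Claim_equal_is_name_entity_type := by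
  intro e _
  unfold Spec_is_name_entity_type
  exact spec_main e
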